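-- pv_equiv track=rewrite | github.com/regivsbannia/Slim_MCBE_Curve_Tool | old/circle_vision_neo.py | generate_quarter_circle_points
-- ===== SOURCE A (Python) =====
-- def generate_quarter_circle_points(r):
--     points = []
--     if r == 0:
--         return points
--
--     x = r
--     y = 0
--     d = 1 - r
--
--     while x >= y:
--         points.append((x, y))
--         if d < 0:
--             d += 2 * y + 3
--         else:
--             d += 2 * (y - x) + 5
--             x -= 1
--         y += 1
--
--     return points
-- ===== SOURCE B (Python) =====
-- import math
--
-- def generate_quarter_circle_points(r):
--     if r <= 0:
--         return []
--     points = []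
--     for y in range(r + 1):
--         x = (math.isqrt(4 * (r * r - y * y)) + 1) // 2
--         if x < y:
--             break
--         points.append((x, y))
--     return points
-- ===== Notes on version B (the rewrite author's own statement) =====
-- stated objective: alternative
-- what changed: Replaces A's incremental midpoint-Bresenham decision variable with a direct per-row closed form: for each y, x is the nearest integer to sqrt(r*r - y*y) computed exactly via math.isqrt, looping y over range(r+1) and breaking when x < y.
import Mathlib
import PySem

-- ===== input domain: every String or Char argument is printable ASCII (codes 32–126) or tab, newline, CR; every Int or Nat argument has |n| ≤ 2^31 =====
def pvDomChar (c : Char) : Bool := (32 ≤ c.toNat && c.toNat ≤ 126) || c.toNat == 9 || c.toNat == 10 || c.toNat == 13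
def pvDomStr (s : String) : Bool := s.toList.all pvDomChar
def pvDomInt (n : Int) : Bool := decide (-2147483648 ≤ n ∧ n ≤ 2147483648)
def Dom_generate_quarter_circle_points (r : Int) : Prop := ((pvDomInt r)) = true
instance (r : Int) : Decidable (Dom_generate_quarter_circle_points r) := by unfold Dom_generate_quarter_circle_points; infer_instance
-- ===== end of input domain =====

-- B replaces A's incremental midpoint decision variable by a per-row closed-form
-- x = round(sqrt(r^2-y^2)) computed with integer isqrt (objective: alternative algorithm, same output).

-- ===== PORT A =====
-- the while loop of A: state (x, y, d), appending (x, y) while x ≥ y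
def pvLoopA (r x y d : Int) : List (Int × Int) :=
  if h : y ≤ x then
    (x, y) ::
      (if d < 0 then pvLoopA r x (y + 1) (d + 2 * y + 3)
       else pvLoopA r (x - 1) (y + 1) (d + 2 * (y - x) + 5))
  else []
termination_by (x + 1 - y).toNat
decreasing_by all_goals omega

def generate_quarter_circle_points (r : Int) : List (Int × Int) :=
  if r = 0 then [] else pvLoopA r r 0 (1 - r)

-- ===== PORT B =====
-- x for row y: (isqrt(4*(r*r - y*y)) + 1) // 2  (the toNat clamp is only ever
-- applied to nonnegative values on the inputs reached by pvLoopB)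
def pvRowX (r y : Int) : Int :=
  PySem.Int.floordiv ((Nat.sqrt ((4 * (r * r - y * y)).toNat) : Int) + 1) 2

-- the 'for y in range(r+1): … break' loop of B, as a countdown over the range length
def pvLoopB (r : Int) : Nat → Int → List (Int × Int)
  | 0, _ => []
  | n + 1, y =>
    let x := pvRowX r y
    if x < y then [] else (x, y) :: pvLoopB r n (y + 1)

def generate_quarter_circle_points_alt (r : Int) : List (Int × Int) :=
  if r ≤ 0 then [] else pvLoopB r (r + 1).toNat 0

-- ===== PRECONDITION & SPEC =====
def Spec_generate_quarter_circle_points (r : Int) (out : List (Int × Int)) : Prop := out = generate_quarter_circle_points_alt r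
instance (r : Int) (out : List (Int × Int)) : Decidable (Spec_generate_quarter_circle_points r out) := by unfold Spec_generate_quarter_circle_points; infer_instance

-- ===== CLAIM (what is proved, stated in full; the proofs are below) =====
def Claim_equal_generate_quarter_circle_points : Prop := ∀ (r : Int), Dom_generate_quarter_circle_points r → Spec_generate_quarter_circle_points r (generate_quarter_circle_points r)

-- ===== LEMMAS AND PROOFS =====

-- if r*r - y*y ≤ x*x + x then the closed-form row value is at most x
lemma pvRowX_le (r y x : Int) (hx : 0 ≤ x) (hQ : r * r - y * y ≤ x * x + x) :
    pvRowX r y ≤ x := by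
  unfold pvRowX
  rw [PySem.Int.floordiv_eq_ediv_of_pos (by omega)]
  have ht : (((2 * x + 1).toNat : Int)) = 2 * x + 1 := Int.toNat_of_nonneg (by omega)
  have hm : ((4 * (r * r - y * y)).toNat : Int) < (2 * x + 1) * (2 * x + 1) := by
    by_cases h : 4 * (r * r - y * y) ≤ 0
    · rw [Int.toNat_of_nonpos h]; push_cast; nlinarith
    · rw [Int.toNat_of_nonneg (by omega)]; nlinarith
  have h : (4 * (r * r - y * y)).toNat < (2 * x + 1).toNat * (2 * x + 1).toNat := by
    zify
    rw [ht]
    exact hm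
  have hs : Nat.sqrt ((4 * (r * r - y * y)).toNat) < (2 * x + 1).toNat :=
    Nat.sqrt_lt'.mpr (by rw [pow_two]; exact h)
  omega

-- if x*x - x < r*r - y*y ≤ x*x + x (x ≥ 1) then the closed-form row value is exactly x
lemma pvRowX_eq (r y x : Int) (hx : 1 ≤ x)
    (h1 : x * x - x < r * r - y * y) (h2 : r * r - y * y ≤ x * x + x) :
    pvRowX r y = x := by
  have hle := pvRowX_le r y x (by omega) h2
  unfold pvRowX at hle ⊢
  rw [PySem.Int.floordiv_eq_ediv_of_pos (by omega)] at hle ⊢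
  have hs0 : (0:Int) ≤ 4 * (r * r - y * y) := by nlinarith
  have hmv : ((4 * (r * r - y * y)).toNat : Int) = 4 * (r * r - y * y) :=
    Int.toNat_of_nonneg hs0
  have ht : (((2 * x - 1).toNat : Int)) = 2 * x - 1 := Int.toNat_of_nonneg (by omega)
  have hlo : (2 * x - 1).toNat ≤ Nat.sqrt ((4 * (r * r - y * y)).toNat) := by
    refine Nat.le_sqrt.mpr ?_
    zify
    rw [ht, hmv]
    nlinarith
  omega

-- loop invariant: d is the midpoint decision value, x is bounded below and (while
-- the guard holds) equals the rounded square root; then the two loops agree.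
lemma pvLoop_eq (r : Int) (hr : 1 ≤ r) :
    ∀ (n : Nat) (x y d : Int),
      (n : Int) = r + 1 - y →
      d = x * x - x + (y + 1) * (y + 1) - r * r →
      0 ≤ y → 0 ≤ x →
      r * r - y * y ≤ x * x + x →
      (y ≤ x → x * x - x < r * r - y * y) →
      pvLoopA r x y d = pvLoopB r n y := by
  intro n
  induction n with
  | zero =>
    intro x y d hn hd hy hx hQ hP
    have hy' : y = r + 1 := by omega
    have hguard : ¬ y ≤ x := by
      intro h
      have := hP h
      nlinarith
    rw [pvLoopA, dif_neg hguard]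
    rfl
  | succ n ih =>
    intro x y d hn hd hy hx hQ hP
    by_cases hguard : y ≤ x
    · have hx1 : 1 ≤ x := by
        by_contra hlt
        have hx0 : x = 0 := by omega
        have hy0 : y = 0 := by omega
        rw [hx0, hy0] at hQ
        nlinarith
      have hrow : pvRowX r y = x := pvRowX_eq r y x hx1 (hP hguard) hQ
      have hB : pvLoopB r (n + 1) y = (x, y) :: pvLoopB r n (y + 1) := by
        show (if pvRowX r y < y then [] else (pvRowX r y, y) :: pvLoopB r n (y + 1)) = _
        rw [hrow, if_neg (by omega)]
      rw [pvLoopA, dif_pos hguard, hB]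
      congr 1
      by_cases hdlt : d < 0
      · rw [if_pos hdlt]
        refine ih x (y + 1) (d + 2 * y + 3) (by omega) (by linear_combination hd)
          (by omega) hx ?_ ?_
        · nlinarith
        · intro _; nlinarith
      · rw [if_neg hdlt]
        refine ih (x - 1) (y + 1) (d + 2 * (y - x) + 5) (by omega)
          (by linear_combination hd) (by omega) (by omega) ?_ ?_
        · nlinarith [not_lt.mp hdlt]
        · intro h
          have := hP hguard
          nlinarith
    · have hrow : pvRowX r y < y := lt_of_le_of_lt (pvRowX_le r y x hx hQ) (by omega)
      have hB : pvLoopB r (n + 1) y = [] := by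
        show (if pvRowX r y < y then [] else (pvRowX r y, y) :: pvLoopB r n (y + 1)) = _
        rw [if_pos hrow]
      rw [pvLoopA, dif_neg hguard, hB]

-- ===== VERDICT (by name: the statement is the Claim_ definition above) =====
theorem generate_quarter_circle_points_spec : Claim_equal_generate_quarter_circle_points := by
  unfold Claim_equal_generate_quarter_circle_points
  intro r _
  unfold Spec_generate_quarter_circle_points
  unfold generate_quarter_circle_points generate_quarter_circle_points_alt
  rcases lt_trichotomy r 0 with h | h | h
  · rw [if_neg (by omega), if_pos (by omega)]
    rw [pvLoopA, dif_neg (by omega)]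
  · simp [h]
  · rw [if_neg (by omega), if_neg (by omega)]
    refine pvLoop_eq r (by omega) (r + 1).toNat r 0 (1 - r) (by omega)
      (by ring) (by omega) (by omega) (by nlinarith) (fun _ => by nlinarith)
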